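-- pv_equiv track=rewrite | github.com/jdrudolph/fnf.theflash-python-pilot | flash.py | find_track
-- ===== SOURCE A (Python) =====
-- import itertools
-- import collections
--
-- def find_track(memory):
--     best_hits = []
--     for k in range(10,20):
--         slices = [memory[i:i+k] for i in range(0,len(memory)-k)]
--         track_freq = collections.defaultdict(lambda : 0)
--         has_value = False
--         for s1,s2 in itertools.combinations(slices,2):
--             if s1 == s2:
--                 track_freq[''.join(s1)] += 1
--                 has_value = True
--         if has_value:
--             try:
--                 best_hits.append(max(track_freq.items(), key=lambda x : x[1]))
--             except:
--                 pass
--     if len(best_hits) == 0: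
--         return "", 0
--     return best_hits[-1]
-- ===== SOURCE B (Python) =====
-- def find_track(memory):
--     best_hits = []
--     n = len(memory)
--     for k in range(10, 20):
--         counts = {}
--         for i in range(n - k):
--             s = memory[i:i+k]
--             counts[s] = counts.get(s, 0) + 1
--         candidates = [(s, c * (c - 1) // 2) for s, c in counts.items() if c >= 2]
--         if candidates:
--             best_hits.append(max(candidates, key=lambda x: x[1]))
--     if not best_hits:
--         return "", 0
--     return best_hits[-1]
-- ===== Notes on version B (the rewrite author's own statement) =====
-- stated objective: faster
-- what changed: Replaces A's quadratic itertools.combinations scan over all pairs of equal slices per length k by a single counting pass (dict of substring occurrence counts, pair frequency c*(c-1)//2), keeping A's max/tie-break and last-k selection.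
import Mathlib
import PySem

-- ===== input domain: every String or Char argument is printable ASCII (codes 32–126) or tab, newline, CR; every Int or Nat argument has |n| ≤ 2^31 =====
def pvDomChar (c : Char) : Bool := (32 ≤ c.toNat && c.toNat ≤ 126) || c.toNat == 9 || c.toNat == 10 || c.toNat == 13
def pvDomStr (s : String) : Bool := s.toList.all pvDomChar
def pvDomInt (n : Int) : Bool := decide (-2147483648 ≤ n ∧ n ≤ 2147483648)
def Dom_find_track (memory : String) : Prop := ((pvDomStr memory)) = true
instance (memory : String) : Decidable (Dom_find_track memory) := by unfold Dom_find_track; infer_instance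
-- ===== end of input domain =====

-- B replaces A's quadratic scan over all pairs of equal slices by a single counting pass per
-- length k (occurrence counter, then c*(c-1)//2 pairs per substring); same results, fewer passes.

-- ===== PORT A =====
-- Loop body of A's 'for k in range(10,20)' loop, factored out as a helper.
-- ''.join(s1) on a Python str s1 is s1 itself, so it is ported as s1.
def pvABody (memory : String) (best_hits : List (String × Int)) (k : Int) :
    List (String × Int) :=
  let slices : List String :=
    (PySem.List.pyRange 0 ((PySem.Str.len memory : Int) - k) 1).map
      (fun i => PySem.Str.slice memory (some i) (some (i + k)))
  let st :=
    (PySem.List.combinations slices 2).foldl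
      (fun (st : PySem.Dict String Int × Bool) c =>
        match c with
        | [s1, s2] => if s1 == s2 then (st.1.modify s1 0 (· + 1), true) else st
        | _ => st)
      (PySem.Dict.empty, false)
  if st.2 then
    -- 'max(track_freq.items(), key=…)': the try/except never fires since the dict is nonempty here
    best_hits ++ [(PySem.List.max? st.1.items (fun x => x.2)).getD ("", 0)]
  else best_hits

def find_track (memory : String) : String × Int :=
  let best_hits : List (String × Int) :=
    (PySem.List.pyRange 10 20 1).foldl (pvABody memory) []
  if best_hits.length = 0 then ("", 0)
  else (PySem.List.pyGet? best_hits (-1)).getD ("", 0)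

-- ===== PORT B =====
-- Loop body of B's 'for k in range(10,20)' loop, factored out as a helper.
def pvBBody (memory : String) (best_hits : List (String × Int)) (k : Int) :
    List (String × Int) :=
  let counts : PySem.Dict String Int :=
    (PySem.List.pyRange 0 ((PySem.Str.len memory : Int) - k) 1).foldl
      (fun d i =>
        let s := PySem.Str.slice memory (some i) (some (i + k))
        d.insert s (d.getD s 0 + 1))
      PySem.Dict.empty
  let candidates := counts.items.filterMap
    (fun p => if 2 ≤ p.2 then some (p.1, PySem.Int.floordiv (p.2 * (p.2 - 1)) 2) else none)
  match candidates with
  | [] => best_hits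
  | _ :: _ => best_hits ++ [(PySem.List.max? candidates (fun x => x.2)).getD ("", 0)]

def find_track_alt (memory : String) : String × Int :=
  let best_hits : List (String × Int) :=
    (PySem.List.pyRange 10 20 1).foldl (pvBBody memory) []
  match best_hits.getLast? with
  | none => ("", 0)
  | some b => b

-- ===== PRECONDITION & SPEC =====
def Spec_find_track (memory : String) (out : String × Int) : Prop := out = find_track_alt memory
instance (memory : String) (out : String × Int) : Decidable (Spec_find_track memory out) := by unfold Spec_find_track; infer_instance

-- ===== CLAIM (what is proved, stated in full; the proofs are below) =====
def Claim_equal_find_track : Prop := ∀ (memory : String), Dom_find_track memory → Spec_find_track memory (find_track memory)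

-- ===== LEMMAS AND PROOFS =====

-- filterMap with an if-some/none body (Prop test) is a filter-then-map
theorem pv_filterMap_ite {α β : Type} (l : List α) (p : α → Prop) [DecidablePred p] (f : α → β) :
    l.filterMap (fun a => if p a then some (f a) else none)
      = (l.filter (fun a => decide (p a))).map f := by
  induction l with
  | nil => rfl
  | cons x xs ih =>
      by_cases h : p x <;> simp [h, ih]

-- set(…) commutes with a pointwise filter
theorem pv_ofList_filter {α : Type} [BEq α] [LawfulBEq α] (l : List α) (p : α → Bool) :
    PySem.Set.ofList (l.filter p) = (PySem.Set.ofList l).filter p := by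
  induction l with
  | nil => rfl
  | cons x xs ih =>
      by_cases h : p x
      · simp only [List.filter_cons, h, if_pos, PySem.Set.ofList_cons, PySem.Set.discard, ih]
        simp [List.filter_filter, Bool.and_comm]
      · have hx : p x = false := by simpa using h
        simp only [List.filter_cons, hx, Bool.false_eq_true, if_false, PySem.Set.ofList_cons,
          PySem.Set.discard, List.filter_filter, ih]
        refine List.filter_congr ?_
        intro a _
        by_cases hax : a = x
        · subst hax; simp [hx]
        · simp [hax]

-- the key s1 recorded by A's inner loop for a combinations element, none if no pair
def pvPairKey (c : List String) : Option String :=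
  match c with
  | [s1, s2] => if s1 == s2 then some s1 else none
  | _ => none

-- A's fold over the pair list is a modify-fold over the recorded keys
theorem pv_fold_pairs (L : List (List String)) (d : PySem.Dict String Int) (b : Bool) :
    L.foldl
      (fun (st : PySem.Dict String Int × Bool) c =>
        match c with
        | [s1, s2] => if s1 == s2 then (st.1.modify s1 0 (· + 1), true) else st
        | _ => st) (d, b)
    = ((L.filterMap pvPairKey).foldl (fun d s => d.modify s 0 (· + 1)) d,
       b || !(L.filterMap pvPairKey).isEmpty) := by
  induction L generalizing d b with
  | nil => simp
  | cons c L ih =>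
      match c with
      | [] => simpa [pvPairKey] using ih d b
      | [_] => simpa [pvPairKey] using ih d b
      | s1 :: s2 :: _ :: _ => simpa [pvPairKey] using ih d b
      | [s1, s2] =>
          by_cases h : s1 = s2
          · subst h
            have h2 := ih (d.modify s1 0 (· + 1)) true
            simpa [pvPairKey] using h2
          · simpa [pvPairKey, h, List.filterMap_cons] using ih d b

-- the pair keys contributed by the head element x against the tail xs
theorem pv_filterMap_pairs_aux (x : String) (ys : List String) :
    ys.filterMap (fun y => if x = y then some x else none)
      = List.replicate (ys.filter (fun y => x == y)).length x := by
  induction ys with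
  | nil => rfl
  | cons y ys ih =>
      by_cases h : x = y
      · subst h; simp [ih, List.replicate_succ]
      · simp [h, ih]

theorem pv_filterMap_pairs (x : String) (xs : List String) :
    ((xs.map (fun y => [y])).map (x :: ·)).filterMap pvPairKey
      = List.replicate (xs.filter (fun y => x == y)).length x := by
  simpa [pvPairKey] using pv_filterMap_pairs_aux x xs

theorem pv_filter_beq_length (x : String) (xs : List String) :
    (xs.filter (fun y => x == y)).length = xs.count x := by
  induction xs with
  | nil => rfl
  | cons y ys ih =>
      by_cases h : x = y
      · subst h; simp [ih]
      · simp [List.filter_cons, h, Ne.symm h, ih]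

-- multiplicity of each key among the recorded pair keys: C(count, 2)
theorem pv_pairKeys_count (xs : List String) (s : String) :
    ((PySem.List.combinations xs 2).filterMap pvPairKey).count s
      = (xs.count s).choose 2 := by
  induction xs with
  | nil => simp [PySem.List.combinations]
  | cons x xs ih =>
      rw [show (2 : Nat) = 1 + 1 from rfl, PySem.List.combinations_cons_succ,
        PySem.List.combinations_one, show (1 + 1 : Nat) = 2 from rfl]
      rw [List.filterMap_append, List.count_append, pv_filterMap_pairs,
        pv_filter_beq_length, List.count_replicate, ih]
      by_cases hsx : s = x
      · subst hsx
        rw [List.count_cons_self, if_pos (by simp)]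
        have h2 : (xs.count s + 1).choose 2 = xs.count s + (xs.count s).choose 2 := by
          rw [show (2 : Nat) = 1 + 1 from rfl, Nat.choose_succ_succ, Nat.choose_one_right]
        omega
      · have hb : (x == s) = false := by simpa using Ne.symm hsx
        rw [List.count_cons_of_ne (Ne.symm hsx), hb]
        simp

theorem pv_ofList_replicate (x : String) (m : Nat) :
    PySem.Set.ofList (List.replicate m x) = if m = 0 then [] else [x] := by
  induction m with
  | zero => rfl
  | succ m ih =>
      rw [List.replicate_succ, PySem.Set.ofList_cons, ih]
      by_cases h : m = 0
      · simp [h, PySem.Set.discard]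
      · simp [h, PySem.Set.discard]

theorem pv_ofList_eq_nil {α : Type} [BEq α] [LawfulBEq α] (l : List α) :
    PySem.Set.ofList l = [] ↔ l = [] := by
  constructor
  · intro h
    cases l with
    | nil => rfl
    | cons x xs =>
        have hm : x ∈ PySem.Set.ofList (x :: xs) :=
          (PySem.Set.mem_ofList (x :: xs) x).mpr (List.mem_cons_self)
        rw [h] at hm
        exact absurd hm (List.not_mem_nil)
  · rintro rfl; rfl

-- the set of recorded pair keys: exactly the elements occurring at least twice, in first-occurrence order
theorem pv_pairKeys_set (xs : List String) :
    PySem.Set.ofList ((PySem.List.combinations xs 2).filterMap pvPairKey)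
      = PySem.Set.ofList (xs.filter (fun s => decide (2 ≤ xs.count s))) := by
  induction xs with
  | nil => simp [PySem.List.combinations]
  | cons x xs ih =>
      rw [show (2 : Nat) = 1 + 1 from rfl, PySem.List.combinations_cons_succ,
        PySem.List.combinations_one, show (1 + 1 : Nat) = 2 from rfl]
      rw [List.filterMap_append, pv_filterMap_pairs, pv_filter_beq_length,
        PySem.Set.ofList_append, pv_ofList_replicate]
      by_cases c0 : xs.count x = 0
      · rw [c0, if_pos rfl]
        have hupd : PySem.Set.update ([] : PySem.Set String)
            ((PySem.List.combinations xs 2).filterMap pvPairKey)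
            = PySem.Set.ofList ((PySem.List.combinations xs 2).filterMap pvPairKey) :=
          PySem.Set.update_empty _
        rw [hupd, ih]
        have hx : x ∉ xs := List.count_eq_zero.mp c0
        have hhead : (x :: xs).count x = 1 := by
          rw [List.count_cons_self, c0]
        rw [List.filter_cons, hhead]
        norm_num
        congr 1
        refine (List.filter_congr ?_).symm
        intro a ha
        have hax : x ≠ a := fun hh => hx (hh ▸ ha)
        rw [List.count_cons_of_ne hax]
      · rw [if_neg c0]
        rw [PySem.Set.update_eq_append_filter, ih]
        have hhead : 2 ≤ (x :: xs).count x := by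
          rw [List.count_cons_self]; omega
        rw [List.filter_cons, if_pos (by simpa using hhead), PySem.Set.ofList_cons]
        simp only [List.singleton_append, PySem.Set.discard]
        congr 1
        rw [pv_ofList_filter, pv_ofList_filter, List.filter_filter, List.filter_filter]
        refine List.filter_congr ?_
        intro a ha
        by_cases hax : a = x
        · subst hax; simp
        · have hcnt : (x :: xs).count a = xs.count a :=
            List.count_cons_of_ne (Ne.symm hax)
          simp [hax, hcnt]

theorem pv_c2 (n : Nat) :
    PySem.Int.floordiv ((n : Int) * ((n : Int) - 1)) 2 = ((n.choose 2 : Nat) : Int) := by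
  cases n with
  | zero => decide
  | succ m =>
      have h1 : (((m + 1 : Nat)) : Int) * ((((m + 1 : Nat)) : Int) - 1)
          = (((m + 1) * m : Nat) : Int) := by push_cast; ring
      have h2 : PySem.Int.floordiv ((((m + 1) * m : Nat)) : Int) 2
          = ((((m + 1) * m) / 2 : Nat) : Int) := by
        exact_mod_cast PySem.Int.floordiv_natCast ((m + 1) * m) 2
      rw [h1, h2]
      congr 1
      rw [Nat.choose_two_right]
      simp

theorem pv_body_eq (memory : String) (bh : List (String × Int)) (k : Int) :
    pvABody memory bh k = pvBBody memory bh k := by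
  simp only [pvABody, pvBBody]
  -- B's counting loop over the index range is the counter of the slice list
  have h0 := PySem.Dict.foldl_insert_getD_add_one_eq_counter
      ((PySem.List.pyRange 0 ((PySem.Str.len memory : Int) - k) 1).map
        (fun i => PySem.Str.slice memory (some i) (some (i + k))))
  rw [List.foldl_map] at h0
  rw [h0, pv_fold_pairs]
  set S := (PySem.List.pyRange 0 ((PySem.Str.len memory : Int) - k) 1).map
      (fun i => PySem.Str.slice memory (some i) (some (i + k))) with hS
  set P := (PySem.List.combinations S 2).filterMap pvPairKey with hP
  set dA : PySem.Dict String Int := P.foldl (fun d s => d.modify s 0 (· + 1)) PySem.Dict.empty with hdA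
  set F := (PySem.Set.ofList S).filter (fun s => decide (2 ≤ S.count s)) with hF
  have hkeys : dA.keys = PySem.Set.ofList P := by
    rw [hdA, PySem.Dict.keys_foldl_modify, PySem.Dict.keys_empty]
    exact PySem.Set.update_empty _
  have hnd : dA.keys.Nodup := by rw [hkeys]; exact PySem.Set.nodup_ofList P
  have hval : ∀ s : String, dA.getD s 0 = (P.count s : Int) := by
    intro s
    rw [hdA, PySem.Dict.getD_foldl_modify_add_one, PySem.Dict.getD_empty]
    simp
  have hFP : PySem.Set.ofList P = F := by
    rw [hP, pv_pairKeys_set, pv_ofList_filter, hF]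
  have hitems : dA.items = F.map (fun s => (s, ((S.count s).choose 2 : Int))) := by
    rw [PySem.Dict.items_eq_map_keys dA hnd 0, hkeys, hFP]
    refine List.map_congr_left ?_
    intro s _
    rw [hval s, hP, pv_pairKeys_count]
  have hcand : (PySem.Dict.counter S).items.filterMap
      (fun p => if 2 ≤ p.2 then some (p.1, PySem.Int.floordiv (p.2 * (p.2 - 1)) 2) else none)
      = F.map (fun s => (s, ((S.count s).choose 2 : Int))) := by
    rw [PySem.Dict.items_counter, List.filterMap_map]
    have hcomp : ((fun p : String × Int =>
        if 2 ≤ p.2 then some (p.1, PySem.Int.floordiv (p.2 * (p.2 - 1)) 2) else none) ∘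
        (fun s => (s, (S.count s : Int))))
        = fun s => if (2 ≤ ((S.count s : Nat) : Int)) then
            some (s, PySem.Int.floordiv ((S.count s : Int) * ((S.count s : Int) - 1)) 2)
          else none := by
      funext s; rfl
    rw [hcomp, pv_filterMap_ite]
    have hpred : (fun s => decide (2 ≤ ((S.count s : Nat) : Int)))
        = fun s => decide (2 ≤ S.count s) := by
      funext s
      exact decide_eq_decide.mpr (by exact_mod_cast Iff.rfl)
    rw [hpred, ← hF]
    refine List.map_congr_left ?_
    intro s _
    rw [pv_c2]
  rw [hcand, hitems]
  simp only [Bool.false_or]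
  cases hLc : F.map (fun s => (s, ((S.count s).choose 2 : Int))) with
  | nil =>
      have hFnil : F = [] := List.map_eq_nil_iff.mp hLc
      have hPnil : P = [] := (pv_ofList_eq_nil P).mp (by rw [hFP, hFnil])
      simp [hPnil]
  | cons q L' =>
      have hPne : P ≠ [] := by
        intro h0
        have hnil : F = [] := by
          rw [← hFP, h0]; rfl
        rw [hnil] at hLc
        simp at hLc
      have hcond : (!P.isEmpty) = true := by
        simp [hPne]
      rw [hcond]
      rfl

-- best_hits[-1] with the length guard is getLast? with default
theorem pv_last_eq (l : List (String × Int)) :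
    (if l.length = 0 then (("", 0) : String × Int)
     else (PySem.List.pyGet? l (-1)).getD ("", 0))
    = (match l.getLast? with | none => ("", 0) | some b => b) := by
  cases l with
  | nil => rfl
  | cons a as =>
      have hlen : (a :: as).length ≠ 0 := by simp
      rw [if_neg hlen]
      have hget : PySem.List.pyGet? (a :: as) (-1) = (a :: as).getLast? := by
        rw [List.getLast?_eq_getElem?]
        simp [PySem.List.pyGet?, PySem.List.pyIdx?]
      rw [hget]
      cases hlast : (a :: as).getLast? with
      | none => simp at hlast
      | some b => rfl

-- ===== VERDICT (by name: the statement is the Claim_ definition above) =====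
theorem find_track_spec : Claim_equal_find_track := by
  intro memory _
  unfold Spec_find_track find_track find_track_alt
  have hfun : pvABody memory = pvBBody memory := by
    funext bh k; exact pv_body_eq memory bh k
  rw [hfun]
  exact pv_last_eq _
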